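-- pv_equiv track=rewrite | github.com/SayyedSuheir/foundations-cs-python | Assignment2/main2.py | RearrangeUpper
-- ===== SOURCE A (Python) =====
-- def RearrangeUpper(s):
--    upper_char=""
--    lower_char=""
--    #Big O(N):N is the len of string
--    for char in s:
--
--      if char.isupper():
--        upper_char += char
--      else:
--        lower_char += char
--
--    return upper_char + lower_char
-- ===== SOURCE B (Python) =====
-- def RearrangeUpper(s):
--     # Stable sort by a binary key: uppercase chars (key False) come first,
--     # everything else (key True) after, each group in original order.
--     return "".join(sorted(s, key=lambda c: not c.isupper()))
-- ===== Notes on version B (the rewrite author's own statement) =====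
-- stated objective: idiomatic
-- what changed: Replaces the two-accumulator partition loop with a single stable sort keyed on whether the character is non-uppercase, so the partition emerges from sort stability with no explicit branching.
import Mathlib
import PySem

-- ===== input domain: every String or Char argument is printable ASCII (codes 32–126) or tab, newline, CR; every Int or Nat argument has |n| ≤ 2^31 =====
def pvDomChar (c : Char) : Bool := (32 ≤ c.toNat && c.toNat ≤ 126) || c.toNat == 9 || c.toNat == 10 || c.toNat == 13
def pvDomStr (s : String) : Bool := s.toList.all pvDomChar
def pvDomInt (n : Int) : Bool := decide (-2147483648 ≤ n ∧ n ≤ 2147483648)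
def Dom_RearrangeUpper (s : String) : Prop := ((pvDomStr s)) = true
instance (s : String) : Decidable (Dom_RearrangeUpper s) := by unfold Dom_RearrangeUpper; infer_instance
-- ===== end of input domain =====

-- B replaces A's two-accumulator partition loop by one stable sort keyed on "not isupper"; equivalence proved for all strings.


-- ===== PORT A =====
-- A: loop over the string, appending to one of two accumulators, then concatenate.
def RearrangeUpper (s : String) : String :=
  let p := s.toList.foldl
    (fun (acc : List Char × List Char) c =>
      if PySem.Chars.isupper c then (acc.1 ++ [c], acc.2) else (acc.1, acc.2 ++ [c]))
    ([], [])
  String.ofList (p.1 ++ p.2)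

-- ===== PORT B =====
-- B: ''.join(sorted(s, key=lambda c: not c.isupper())) — one stable sort with a Bool key.
def RearrangeUpper_alt (s : String) : String :=
  String.ofList (PySem.List.sorted s.toList (fun c => !PySem.Chars.isupper c))

-- ===== PRECONDITION & SPEC =====
def Spec_RearrangeUpper (s : String) (out : String) : Prop := out = RearrangeUpper_alt s
instance (s : String) (out : String) : Decidable (Spec_RearrangeUpper s out) := by unfold Spec_RearrangeUpper; infer_instance

-- ===== CLAIM (what is proved, stated in full; the proofs are below) =====
def Claim_equal_RearrangeUpper : Prop := ∀ (s : String), Dom_RearrangeUpper s → Spec_RearrangeUpper s (RearrangeUpper s)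

-- ===== LEMMAS AND PROOFS =====

-- insertBy with a predicate that is false on all of A and true on all of B inserts exactly between them
theorem insertBy_partition {α : Type} (before : α → α → Bool) (x : α) (A B : List α)
    (hA : ∀ y ∈ A, before x y = false) (hB : ∀ y ∈ B, before x y = true) :
    PySem.List.insertBy before x (A ++ B) = A ++ x :: B := by
  induction A with
  | nil =>
    cases B with
    | nil => simp [PySem.List.insertBy]
    | cons y ys => simp [PySem.List.insertBy, hB y (by simp)]
  | cons a as ih =>
    have ha : before x a = false := hA a (by simp)
    simp only [List.cons_append, PySem.List.insertBy, ha]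
    simp [ih (fun y hy => hA y (by simp [hy]))]

-- A's loop computes the pair (filter P, filter ¬P), for any initial accumulators
theorem foldl_partition {α : Type} (P : α → Bool) (xs : List α) (u l : List α) :
    xs.foldl (fun (acc : List α × List α) c =>
        if P c then (acc.1 ++ [c], acc.2) else (acc.1, acc.2 ++ [c])) (u, l)
      = (u ++ xs.filter P, l ++ xs.filter (fun c => !P c)) := by
  induction xs generalizing u l with
  | nil => simp
  | cons c cs ih =>
    by_cases h : P c = true
    · simp [h, ih]
    · simp at h
      simp [h, ih]

-- the stable sort by the binary key ¬P is exactly the partition filter P ++ filter ¬P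
theorem sorted_binary_key_partition {α : Type} (P : α → Bool) (xs : List α) :
    PySem.List.sorted xs (fun c => !P c)
      = xs.filter P ++ xs.filter (fun c => !P c) := by
  rw [PySem.List.sorted_eq_foldl_insertBy]
  induction xs using List.reverseRecOn with
  | nil => simp
  | append_singleton ys x ih =>
    rw [List.foldl_append, List.foldl_cons, List.foldl_nil, ih]
    by_cases h : P x = true
    · rw [insertBy_partition _ x _ _ ?_ ?_]
      · simp [h]
      · intro y hy
        simp [h, List.of_mem_filter hy]
      · intro y hy
        have := List.of_mem_filter hy
        simp at this
        simp [h, this]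
    · simp at h
      rw [PySem.List.insertBy_of_forall_not_before _ x _ ?_]
      · simp [h]
      · intro y hy
        simp [h]

-- ===== VERDICT (by name: the statement is the Claim_ definition above) =====
theorem RearrangeUpper_spec : Claim_equal_RearrangeUpper := by
  intro s _
  unfold Spec_RearrangeUpper RearrangeUpper RearrangeUpper_alt
  rw [sorted_binary_key_partition, foldl_partition]
  simp
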